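-- pv_equiv track=rewrite | github.com/samucj73/roleta-css-detector | lotomania.py | validar_dicas
-- ===== SOURCE A (Python) =====
-- PRIMOS = [2, 3, 5, 7, 11, 13, 17, 19, 23, 29, 31, 37, 41, 43, 47,
--           53, 59, 61, 67, 71, 73, 79, 83, 89, 97]
--
-- FIBONACCI = [1, 2, 3, 5, 8, 13, 21, 34, 55, 89]
--
-- def validar_dicas(dezenas):
--     pares = len([d for d in dezenas if d % 2 == 0])
--     if not (6 <= pares <= 14): return False
--     primos = len([d for d in dezenas if d in PRIMOS])
--     if not (2 <= primos <= 8): return False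
--     fib = len([d for d in dezenas if d in FIBONACCI])
--     if not (0 <= fib <= 4): return False
--     soma = sum(dezenas)
--     if not (785 <= soma <= 1203): return False
--     return True
-- ===== SOURCE B (Python) =====
-- PRIMOS = [2, 3, 5, 7, 11, 13, 17, 19, 23, 29, 31, 37, 41, 43, 47,
--           53, 59, 61, 67, 71, 73, 79, 83, 89, 97]
--
-- FIBONACCI = [1, 2, 3, 5, 8, 13, 21, 34, 55, 89]
--
-- _PRIMOS_SET = frozenset(PRIMOS)
-- _FIB_SET = frozenset(FIBONACCI)
--
-- def validar_dicas(dezenas):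
--     pares = primos = fib = soma = 0
--     for d in dezenas:
--         if d % 2 == 0:
--             pares += 1
--         if d in _PRIMOS_SET:
--             primos += 1
--         if d in _FIB_SET:
--             fib += 1
--         soma += d
--     return (6 <= pares <= 14 and 2 <= primos <= 8
--             and fib <= 4 and 785 <= soma <= 1203)
-- ===== Notes on version B (the rewrite author's own statement) =====
-- stated objective: alternative
-- what changed: B fuses A's four separate list traversals (three filtering comprehensions with list-membership tests plus a sum) into one loop that accumulates the even/prime/fibonacci counters and the running sum together, using set membership, and returns the conjunction of the four range checks at the end instead of A's early-return chain.
import Mathlib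
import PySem

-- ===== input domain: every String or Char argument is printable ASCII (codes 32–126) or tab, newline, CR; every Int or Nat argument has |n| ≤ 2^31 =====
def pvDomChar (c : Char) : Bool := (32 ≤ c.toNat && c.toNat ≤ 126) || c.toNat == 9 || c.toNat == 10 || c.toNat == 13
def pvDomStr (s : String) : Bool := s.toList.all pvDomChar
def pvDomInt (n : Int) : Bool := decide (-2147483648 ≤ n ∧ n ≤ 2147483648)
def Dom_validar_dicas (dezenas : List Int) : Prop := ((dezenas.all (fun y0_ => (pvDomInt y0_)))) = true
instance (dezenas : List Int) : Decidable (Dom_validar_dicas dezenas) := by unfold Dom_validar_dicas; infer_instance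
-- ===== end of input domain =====

-- B fuses A's four separate traversals into one accumulating pass; proved equal to A on all inputs.

-- ===== PORT A =====
def PRIMOS : List Int := [2, 3, 5, 7, 11, 13, 17, 19, 23, 29, 31, 37, 41, 43, 47,
                          53, 59, 61, 67, 71, 73, 79, 83, 89, 97]

def FIBONACCI : List Int := [1, 2, 3, 5, 8, 13, 21, 34, 55, 89]

def validar_dicas (dezenas : List Int) : Bool :=
  let pares := (dezenas.filter (fun d => PySem.Int.mod d 2 == 0)).length
  if ¬ (6 ≤ pares ∧ pares ≤ 14) then false else
  let primos := (dezenas.filter (fun d => PRIMOS.contains d)).length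
  if ¬ (2 ≤ primos ∧ primos ≤ 8) then false else
  let fib := (dezenas.filter (fun d => FIBONACCI.contains d)).length
  if ¬ (0 ≤ fib ∧ fib ≤ 4) then false else
  let soma := dezenas.sum
  if ¬ (785 ≤ soma ∧ soma ≤ 1203) then false else
  true

-- ===== PORT B =====
def primosSet : PySem.Set Int := PySem.Set.ofList PRIMOS
def fibSet : PySem.Set Int := PySem.Set.ofList FIBONACCI

def bStep (st : Int × Int × Int × Int) (d : Int) : Int × Int × Int × Int :=
  ((if PySem.Int.mod d 2 = 0 then st.1 + 1 else st.1),
   (if PySem.Set.contains primosSet d then st.2.1 + 1 else st.2.1),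
   (if PySem.Set.contains fibSet d then st.2.2.1 + 1 else st.2.2.1),
   st.2.2.2 + d)

def validar_dicas_alt (dezenas : List Int) : Bool :=
  let st := dezenas.foldl bStep (0, 0, 0, 0)
  decide (6 ≤ st.1 ∧ st.1 ≤ 14 ∧ 2 ≤ st.2.1 ∧ st.2.1 ≤ 8 ∧
          st.2.2.1 ≤ 4 ∧ 785 ≤ st.2.2.2 ∧ st.2.2.2 ≤ 1203)

-- ===== PRECONDITION & SPEC =====
def Spec_validar_dicas (dezenas : List Int) (out : Bool) : Prop := out = validar_dicas_alt dezenas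
instance (dezenas : List Int) (out : Bool) : Decidable (Spec_validar_dicas dezenas out) := by unfold Spec_validar_dicas; infer_instance

-- ===== CLAIM (what is proved, stated in full; the proofs are below) =====
def Claim_equal_validar_dicas : Prop := ∀ (dezenas : List Int), Dom_validar_dicas dezenas → Spec_validar_dicas dezenas (validar_dicas dezenas)

-- ===== LEMMAS AND PROOFS =====

-- Loop invariant: the fused fold computes the three filter-counts and the sum.
lemma bFold_eq (xs : List Int) : ∀ (p q f s : Int),
    xs.foldl bStep (p, q, f, s) =
      (p + ((xs.filter (fun d => PySem.Int.mod d 2 == 0)).length : Int),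
       q + ((xs.filter (fun d => PRIMOS.contains d)).length : Int),
       f + ((xs.filter (fun d => FIBONACCI.contains d)).length : Int),
       s + xs.sum) := by
  induction xs with
  | nil => intro p q f s; simp
  | cons x xs ih =>
    intro p q f s
    have hmem : PySem.Set.contains primosSet x = PRIMOS.contains x := by
      simp [primosSet, PySem.Set.contains]
    have hmem2 : PySem.Set.contains fibSet x = FIBONACCI.contains x := by
      simp [fibSet, PySem.Set.contains]
    simp only [List.foldl_cons, ih, bStep, List.filter_cons, List.sum_cons, hmem, hmem2]
    split_ifs with h1 h2 h3 <;> simp_all [add_assoc] <;> omega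

-- ===== VERDICT (by name: the statement is the Claim_ definition above) =====
theorem validar_dicas_spec : Claim_equal_validar_dicas := by
  intro dezenas _
  unfold Spec_validar_dicas validar_dicas validar_dicas_alt
  rw [bFold_eq dezenas 0 0 0 0]
  simp only [zero_add]
  split_ifs <;> simp_all <;> omega
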